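-- pv_equiv track=rewrite | github.com/ZeroTrepidation/AoC-2024 | src/utils/reportValidation.py | validate_split_report
-- ===== SOURCE A (Python) =====
-- def validate_split_report(report, increasing, strict):
--
--     if strict:
--         deletion_used = True
--         deletions_allowed = False
--     else:
--         deletion_used = False
--         deletions_allowed = True
--
--     for i in range(len(report)-1):
--         valid_level = level_compare(report[i], report[i + 1], increasing)
--
--         if not valid_level and not deletions_allowed:
--             return False
--
--         if not valid_level and deletions_allowed:
--             if deletion_used:
--                 return False
--
--             list1 = report.copy()
--             list2 = report.copy()
--
--             list1.pop(i)
--             list2.pop(i+1)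
--
--             valid_removal = (validate_split_report(list1, True, True) or validate_split_report(list2, True, True) or
--                              validate_split_report(list1, False, True) or validate_split_report(list2, False, True))
--
--             if valid_removal:
--                 return True
--             else:
--                 return False
--
--     return True
--
-- def level_compare(num_1, num_2, increasing):
--     difference = abs(num_1 - num_2)
--
--     if difference < 1 or difference > 3:
--         return False
--
--     if num_1 > num_2 and increasing:
--         return False
--
--     if num_1 < num_2 and not increasing:
--         return False
--
--     return True
-- ===== SOURCE B (Python) =====
-- def validate_split_report(report, increasing, strict):
--     # Work on the difference array: a report is valid iff every adjacent
--     # difference lies in the band 1..3 (increasing) or -3..-1 (decreasing).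
--     # Deleting an element merges two adjacent differences, so the one-deletion
--     # candidates are built by surgery on the diff array, never on the report.
--     d = [report[k + 1] - report[k] for k in range(len(report) - 1)]
--     lo, hi = (1, 3) if increasing else (-3, -1)
--     if strict:
--         return all(lo <= x <= hi for x in d)
--     for i, x in enumerate(d):
--         if not (lo <= x <= hi):
--             d1 = d[:i - 1] + [d[i - 1] + x] + d[i + 1:] if i > 0 else d[1:]
--             d2 = d[:i] + [x + d[i + 1]] + d[i + 2:] if i + 1 < len(d) else d[:i]
--             return (all(1 <= y <= 3 for y in d1) or all(1 <= y <= 3 for y in d2)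
--                     or all(-3 <= y <= -1 for y in d1) or all(-3 <= y <= -1 for y in d2))
--     return True
-- ===== Notes on version B (the rewrite author's own statement) =====
-- stated objective: alternative
-- what changed: B works on the difference array instead of the report: validity is band membership (1..3 or -3..-1) of consecutive differences, and the two one-deletion candidates are built by merging adjacent differences in that array, replacing A's recursive self-calls on popped copies of the report.
import Mathlib
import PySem

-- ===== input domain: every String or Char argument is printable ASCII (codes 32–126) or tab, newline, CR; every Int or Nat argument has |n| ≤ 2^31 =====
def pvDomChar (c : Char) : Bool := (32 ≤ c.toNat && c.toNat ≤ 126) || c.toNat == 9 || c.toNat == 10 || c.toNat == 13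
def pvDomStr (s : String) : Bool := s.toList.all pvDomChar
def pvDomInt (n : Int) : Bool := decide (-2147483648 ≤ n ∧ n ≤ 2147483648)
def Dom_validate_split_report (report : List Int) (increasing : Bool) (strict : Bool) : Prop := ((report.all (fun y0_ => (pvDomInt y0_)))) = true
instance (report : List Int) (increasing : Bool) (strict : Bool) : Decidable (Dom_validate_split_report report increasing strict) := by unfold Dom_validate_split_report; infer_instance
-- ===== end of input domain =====

-- B reformulates A on the difference array (band membership 1..3 / -3..-1; deletion = merging adjacent diffs) — an alternative representation, same behaviour.


-- ===== PORT A =====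
-- Shared module helper level_compare (used by A only; B never calls it).
def level_compare (num_1 num_2 : Int) (increasing : Bool) : Bool :=
  let difference := |num_1 - num_2|
  if difference < 1 || difference > 3 then false
  else if num_1 > num_2 && increasing then false
  else if num_1 < num_2 && !increasing then false
  else true

-- Port of A. The for-loop is the structural recursion on the remaining iteration
-- count rem (i runs 0,1,... as in range(len(report)-1)); the self-recursive call of A
-- is the recur argument, tied by vsrA through an explicit fuel parameter — a totality
-- guard only: validate_split_report passes fuel = report.length + 1 and every recursive
-- call is on a list one element shorter, so the fuel is never exhausted.
-- report.pop(i) on a copy is List.eraseIdx (i nonnegative and in range, so exact).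
def vsrLoop (recur : List Int → Bool → Bool → Bool) (report : List Int)
    (increasing deletion_used deletions_allowed : Bool) (i : Nat) (rem : Nat) : Bool :=
  match rem with
  | 0 => true
  | rem + 1 =>
    let valid_level := level_compare (report.getD i 0) (report.getD (i+1) 0) increasing
    if !valid_level && !deletions_allowed then false
    else if !valid_level && deletions_allowed then
      if deletion_used then false
      else
        let list1 := report.eraseIdx i
        let list2 := report.eraseIdx (i+1)
        let valid_removal := recur list1 true true || recur list2 true true ||
                             recur list1 false true || recur list2 false true
        if valid_removal then true else false
    else vsrLoop recur report increasing deletion_used deletions_allowed (i+1) rem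

def vsrA (fuel : Nat) (report : List Int) (increasing strict : Bool) : Bool :=
  match fuel with
  | 0 => true  -- never reached: fuel starts at report.length + 1 and drops by 1 per recursive call
  | fuel + 1 =>
    let deletion_used := strict
    let deletions_allowed := !strict
    vsrLoop (vsrA fuel) report increasing deletion_used deletions_allowed 0 (report.length - 1)

def validate_split_report (report : List Int) (increasing : Bool) (strict : Bool) : Bool :=
  vsrA (report.length + 1) report increasing strict

-- ===== PORT B =====
-- d = [report[k+1] - report[k] for k in range(len(report)-1)]  (indices in range, so getD is exact)
def vsrDiffs (report : List Int) : List Int :=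
  (List.range (report.length - 1)).map (fun k => report.getD (k+1) 0 - report.getD k 0)

-- all(lo <= x <= hi for x in d)
def vsrBandAll (lo hi : Int) (d : List Int) : Bool :=
  d.all (fun x => decide (lo ≤ x) && decide (x ≤ hi))

-- the `for i, x in enumerate(d)` loop, as structural recursion on the index i
def vsrScanB (lo hi : Int) (d : List Int) (i : Nat) : Bool :=
  if i < d.length then
    let x := d.getD i 0
    if lo ≤ x ∧ x ≤ hi then vsrScanB lo hi d (i+1)
    else
      let d1 := if 0 < i then d.take (i-1) ++ [d.getD (i-1) 0 + x] ++ d.drop (i+1) else d.drop 1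
      let d2 := if i + 1 < d.length then d.take i ++ [x + d.getD (i+1) 0] ++ d.drop (i+2) else d.take i
      vsrBandAll 1 3 d1 || vsrBandAll 1 3 d2 || vsrBandAll (-3) (-1) d1 || vsrBandAll (-3) (-1) d2
  else true
termination_by d.length - i

def validate_split_report_alt (report : List Int) (increasing : Bool) (strict : Bool) : Bool :=
  let d := vsrDiffs report
  let lo : Int := if increasing then 1 else -3
  let hi : Int := if increasing then 3 else -1
  if strict then vsrBandAll lo hi d else vsrScanB lo hi d 0

-- ===== PRECONDITION & SPEC =====
def Spec_validate_split_report (report : List Int) (increasing : Bool) (strict : Bool) (out : Bool) : Prop := out = validate_split_report_alt report increasing strict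
instance (report : List Int) (increasing : Bool) (strict : Bool) (out : Bool) : Decidable (Spec_validate_split_report report increasing strict out) := by unfold Spec_validate_split_report; infer_instance

-- ===== CLAIM (what is proved, stated in full; the proofs are below) =====
def Claim_equal_validate_split_report : Prop := ∀ (report : List Int) (increasing : Bool) (strict : Bool), Dom_validate_split_report report increasing strict → Spec_validate_split_report report increasing strict (validate_split_report report increasing strict)

-- ===== LEMMAS AND PROOFS =====

-- A's pairwise validity, as an all over indices (proof-side bridge between the ports).
def adjAll (rep : List Int) (inc : Bool) : Bool :=
  (List.range (rep.length - 1)).all (fun j => level_compare (rep.getD j 0) (rep.getD (j+1) 0) inc)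

lemma level_compare_band (a b : Int) (inc : Bool) :
    level_compare a b inc =
      (decide ((if inc then (1:Int) else -3) ≤ b - a) && decide (b - a ≤ (if inc then (3:Int) else -1))) := by
  rw [Bool.eq_iff_iff]
  cases inc <;> simp [level_compare] <;> rcases abs_cases (a - b) with ⟨h, _⟩ | ⟨h, _⟩ <;>
    rw [h] <;> constructor <;> intro <;> omega

lemma getD_lt (l : List Int) (j : Nat) (h : j < l.length) : l.getD j 0 = l[j] :=
  List.getD_eq_getElem l 0 h

lemma diffs_len (r : List Int) : (vsrDiffs r).length = r.length - 1 := by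
  simp [vsrDiffs]

lemma diffs_getElem (r : List Int) (k : Nat) (h : k < (vsrDiffs r).length) :
    (vsrDiffs r)[k] = r.getD (k+1) 0 - r.getD k 0 := by
  simp [vsrDiffs]

lemma diffs_getD (r : List Int) (k : Nat) (h : k < r.length - 1) :
    (vsrDiffs r).getD k 0 = r.getD (k+1) 0 - r.getD k 0 := by
  rw [getD_lt _ _ (by simpa [diffs_len] using h), diffs_getElem]

lemma eraseIdx_getD (r : List Int) (i j : Nat) (hi : i < r.length) (hj : j < r.length - 1) :
    (r.eraseIdx i).getD j 0 = if j < i then r.getD j 0 else r.getD (j+1) 0 := by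
  have hjl : j < (r.eraseIdx i).length := by rw [List.length_eraseIdx]; split <;> omega
  rw [getD_lt _ _ hjl, List.getElem_eraseIdx]
  split
  · exact ((getD_lt _ _ (by omega)).symm)
  · exact ((getD_lt _ _ (by omega)).symm)

lemma decideAnd (p q : Prop) [Decidable p] [Decidable q] :
    (decide p && decide q) = decide (p ∧ q) := by
  by_cases hp : p <;> by_cases hq : q <;> simp [hp, hq]

lemma diffs_erase_zero (r : List Int) : vsrDiffs (r.eraseIdx 0) = (vsrDiffs r).drop 1 := by
  apply List.ext_getElem
  · simp only [diffs_len, List.length_drop, List.length_eraseIdx]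
    split <;> omega
  · intro k h1 h2
    have hk : k < r.length - 2 := by
      simp only [List.length_drop, diffs_len] at h2; omega
    have hr : 0 < r.length := by omega
    rw [List.getElem_drop, diffs_getElem, diffs_getElem,
        eraseIdx_getD _ _ _ hr (by omega), eraseIdx_getD _ _ _ hr (by omega)]
    rw [if_neg (by omega), if_neg (by omega), Nat.add_comm 1 k]

lemma diffs_erase_mid (r : List Int) (i : Nat) (h0 : 0 < i) (hi : i < r.length - 1) :
    vsrDiffs (r.eraseIdx i) =
      (vsrDiffs r).take (i-1) ++ [(vsrDiffs r).getD (i-1) 0 + (vsrDiffs r).getD i 0] ++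
        (vsrDiffs r).drop (i+1) := by
  apply List.ext_getElem
  · simp only [diffs_len, List.length_eraseIdx, List.length_append, List.length_take,
      List.length_cons, List.length_nil, List.length_drop]
    split <;> omega
  · intro k h1 h2
    have hk : k < r.length - 2 := by
      simp only [List.length_append, List.length_take, List.length_cons, List.length_nil,
        diffs_len, List.length_drop] at h2
      omega
    rw [diffs_getElem, eraseIdx_getD _ _ _ (by omega) (by omega),
        eraseIdx_getD _ _ _ (by omega) (by omega)]
    have hT : ((vsrDiffs r).take (i-1)).length = i - 1 := by
      simp only [List.length_take, diffs_len]; omega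
    have hTM : ((vsrDiffs r).take (i-1) ++ [(vsrDiffs r).getD (i-1) 0 + (vsrDiffs r).getD i 0]).length = i := by
      simp only [List.length_append, hT, List.length_cons, List.length_nil]; omega
    rw [List.getElem_append]
    by_cases hk1 : k < i - 1
    · rw [dif_pos (by rw [hTM]; omega), List.getElem_append,
          dif_pos (by rw [hT]; omega), List.getElem_take, diffs_getElem]
      rw [if_pos (by omega), if_pos (by omega)]
    · by_cases hk2 : k = i - 1
      · rw [dif_pos (by rw [hTM]; omega), List.getElem_append,
            dif_neg (by rw [hT]; omega)]
        have h0' : k - ((vsrDiffs r).take (i-1)).length = 0 := by rw [hT]; omega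
        simp only [h0', List.getElem_cons_zero]
        rw [diffs_getD r (i-1) (by omega), diffs_getD r i (by omega)]
        rw [if_neg (by omega), if_pos (by omega)]
        subst hk2
        rw [Nat.sub_add_cancel (by omega)]
        ring
      · rw [dif_neg (by rw [hTM]; omega)]
        simp only [hTM]
        rw [List.getElem_drop, diffs_getElem]
        rw [if_neg (by omega), if_neg (by omega)]
        have e1 : i + 1 + (k - i) = k + 1 := by omega
        simp only [e1]

lemma diffs_erase_last (r : List Int) (h : 1 ≤ r.length) :
    vsrDiffs (r.eraseIdx (r.length - 1)) = (vsrDiffs r).take (r.length - 2) := by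
  apply List.ext_getElem
  · simp only [diffs_len, List.length_eraseIdx, List.length_take]
    split <;> omega
  · intro k h1 h2
    have hk : k < r.length - 2 := by
      simp only [List.length_take, diffs_len] at h2; omega
    rw [List.getElem_take, diffs_getElem, diffs_getElem,
        eraseIdx_getD _ _ _ (by omega) (by omega), eraseIdx_getD _ _ _ (by omega) (by omega)]
    rw [if_pos (by omega), if_pos (by omega)]

lemma band_eq_adjAll (rep : List Int) (inc : Bool) :
    vsrBandAll (if inc then 1 else -3) (if inc then 3 else -1) (vsrDiffs rep) = adjAll rep inc := by
  simp only [vsrBandAll, adjAll, vsrDiffs, List.all_map]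
  apply List.all_congr rfl
  intro j
  exact (level_compare_band _ _ inc).symm

lemma band_inc (rep : List Int) : vsrBandAll 1 3 (vsrDiffs rep) = adjAll rep true := by
  simpa using band_eq_adjAll rep true

lemma band_dec (rep : List Int) : vsrBandAll (-3) (-1) (vsrDiffs rep) = adjAll rep false := by
  simpa using band_eq_adjAll rep false

-- vsrLoop in strict mode never recurses into A and checks the rem pairs starting at i.
lemma vsrLoop_strict (recur : List Int → Bool → Bool → Bool) (report : List Int)
    (inc : Bool) (i rem : Nat) :
    vsrLoop recur report inc true false i rem =
      (List.range' i rem).all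
        (fun j => level_compare (report.getD j 0) (report.getD (j+1) 0) inc) := by
  induction rem generalizing i with
  | zero => rfl
  | succ rem ih =>
    rw [vsrLoop, List.range'_succ, List.all_cons]
    cases hlc : level_compare (report.getD i 0) (report.getD (i+1) 0) inc <;> simp [ih]

lemma strict_eq_adjAll (fuel : Nat) (report : List Int) (inc : Bool) :
    vsrA (fuel + 1) report inc true = adjAll report inc := by
  rw [vsrA]
  simp only [Bool.not_true]
  rw [vsrLoop_strict]
  simp [adjAll, List.range_eq_range']

lemma vsrLoop_lenient (fuel : Nat) (report : List Int) (inc : Bool) (i rem : Nat)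
    (hrem : rem = report.length - 1 - i) (hf : rem ≤ fuel) :
    vsrLoop (vsrA fuel) report inc false true i rem =
      vsrScanB (if inc then 1 else -3) (if inc then 3 else -1) (vsrDiffs report) i := by
  induction rem generalizing i fuel with
  | zero =>
    rw [vsrLoop, vsrScanB]
    have h : ¬ i < (vsrDiffs report).length := by rw [diffs_len]; omega
    simp [h]
  | succ rem ih =>
    obtain ⟨f, rfl⟩ : ∃ f, fuel = f + 1 := ⟨fuel - 1, by omega⟩
    rw [vsrLoop, vsrScanB]
    have h : i < (vsrDiffs report).length := by rw [diffs_len]; omega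
    rw [if_pos h]
    have hx : (vsrDiffs report).getD i 0 = report.getD (i+1) 0 - report.getD i 0 :=
      diffs_getD _ _ (by omega)
    have hguard : level_compare (report.getD i 0) (report.getD (i+1) 0) inc =
        decide ((if inc then (1:Int) else -3) ≤ (vsrDiffs report).getD i 0 ∧
                (vsrDiffs report).getD i 0 ≤ (if inc then (3:Int) else -1)) := by
      rw [level_compare_band, decideAnd, hx]
    by_cases hcond : ((if inc then (1:Int) else -3) ≤ (vsrDiffs report).getD i 0 ∧
                      (vsrDiffs report).getD i 0 ≤ (if inc then (3:Int) else -1))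
    · rw [if_pos hcond]
      have hlc : level_compare (report.getD i 0) (report.getD (i+1) 0) inc = true := by
        rw [hguard]; exact decide_eq_true hcond
      simp only [hlc, Bool.not_true, Bool.false_and, Bool.and_self, Bool.false_eq_true,
        if_false]
      exact ih (f + 1) (i+1) (by omega) (by omega)
    · rw [if_neg hcond]
      have hlc : level_compare (report.getD i 0) (report.getD (i+1) 0) inc = false := by
        rw [hguard]; exact decide_eq_false hcond
      have hd1 : vsrDiffs (report.eraseIdx i) =
          (if 0 < i then
            (vsrDiffs report).take (i-1) ++
              [(vsrDiffs report).getD (i-1) 0 + (vsrDiffs report).getD i 0] ++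
              (vsrDiffs report).drop (i+1)
          else (vsrDiffs report).drop 1) := by
        by_cases h0 : 0 < i
        · rw [if_pos h0, diffs_erase_mid report i h0 (by rw [diffs_len] at h; omega)]
        · have hi0 : i = 0 := by omega
          subst hi0
          rw [if_neg h0, diffs_erase_zero]
      have hd2 : vsrDiffs (report.eraseIdx (i+1)) =
          (if i + 1 < (vsrDiffs report).length then
            (vsrDiffs report).take i ++
              [(vsrDiffs report).getD i 0 + (vsrDiffs report).getD (i+1) 0] ++
              (vsrDiffs report).drop (i+2)
          else (vsrDiffs report).take i) := by
        by_cases h1 : i + 1 < (vsrDiffs report).length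
        · rw [if_pos h1, diffs_erase_mid report (i+1) (by omega)
            (by rw [diffs_len] at h1; omega)]
          simp only [Nat.add_sub_cancel]
        · rw [diffs_len] at h h1
          have hlast : i + 1 = report.length - 1 := by omega
          rw [if_neg (by rw [diffs_len]; omega), hlast,
              diffs_erase_last report (by omega)]
          congr 1
          omega
      simp only [hlc, Bool.not_false, Bool.true_and, Bool.and_true, if_true]
      rw [if_neg (by simp : ¬ (false = true))]
      rw [← hd1, ← hd2]
      simp only [strict_eq_adjAll, band_inc, band_dec]
      cases hX : (adjAll (report.eraseIdx i) true || adjAll (report.eraseIdx (i+1)) true ||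
          adjAll (report.eraseIdx i) false || adjAll (report.eraseIdx (i+1)) false) <;>
        simp

theorem validate_split_report_spec : Claim_equal_validate_split_report := by
  intro report increasing strict _
  unfold Spec_validate_split_report validate_split_report_alt validate_split_report
  cases strict
  · rw [vsrA]
    simp only [Bool.not_false, Bool.false_eq_true, if_false]
    exact vsrLoop_lenient report.length report increasing 0 (report.length - 1) (by omega) (by omega)
  · rw [strict_eq_adjAll, if_pos rfl, band_eq_adjAll]
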